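-- pv_equiv track=rewrite | github.com/zverinec/interlos-web | public/download/years/2016/reseni/P4s-solution.py | hated_mooses
-- ===== SOURCE A (Python) =====
-- def hated_mooses(moose_order):
--     hated_mooses = [0]
--
--     for i in range (len(moose_order)):
--         for j in range(i - 1, -1, -1):
--             if moose_order[i] % moose_order[j] == 0:
--                 hated_mooses.append(moose_order[j])
--                 break
--             if j == 0:
--                 hated_mooses.append(0)
--
--     return hated_mooses
-- ===== SOURCE B (Python) =====
-- def hated_mooses(moose_order):
--     result = [0]
--     last = {}  # value -> index of its most recent occurrence
--     for i, x in enumerate(moose_order):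
--         if i > 0:
--             best_j = -1
--             best_v = 0
--             for v, j in last.items():
--                 if x % v == 0 and j > best_j:
--                     best_j = j
--                     best_v = v
--             result.append(best_v)
--         last[x] = i
--     return result
-- ===== Notes on version B (the rewrite author's own statement) =====
-- stated objective: alternative
-- what changed: Instead of rescanning all earlier positions backwards for each element, B maintains a dict mapping each distinct value to its last index and picks the divisor value with the maximal last index, so the inner scan runs over distinct prior values instead of all prior positions.
import Mathlib
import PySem

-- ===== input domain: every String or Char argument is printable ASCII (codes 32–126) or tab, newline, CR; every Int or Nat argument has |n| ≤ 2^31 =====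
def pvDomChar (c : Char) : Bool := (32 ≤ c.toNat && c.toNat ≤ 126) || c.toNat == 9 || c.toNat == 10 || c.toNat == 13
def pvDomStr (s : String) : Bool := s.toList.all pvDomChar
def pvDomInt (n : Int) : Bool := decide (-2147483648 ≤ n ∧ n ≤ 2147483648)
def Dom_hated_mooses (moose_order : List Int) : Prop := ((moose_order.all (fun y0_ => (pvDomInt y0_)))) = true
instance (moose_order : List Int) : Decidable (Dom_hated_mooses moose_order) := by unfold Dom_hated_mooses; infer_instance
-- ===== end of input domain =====

-- B replaces A's backward rescan of all earlier positions with a dict of last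
-- occurrence per distinct value, choosing the divisor value with the maximal last
-- index (objective: alternative).

-- ===== PORT A =====
-- inner loop 'for j in range(i-1, -1, -1): …' of A, over the descending index list
def hmA_inner (a : List Int) (xi : Int) : List Int → List Int → List Int
  | [], acc => acc
  | j :: js, acc =>
    if PySem.Int.mod xi (PySem.List.pyGetD a j 0) = 0 then
      acc ++ [PySem.List.pyGetD a j 0]
    else if j = 0 then
      hmA_inner a xi js (acc ++ [0])
    else
      hmA_inner a xi js acc

def hated_mooses (moose_order : List Int) : List Int :=
  (PySem.List.pyRange 0 (PySem.List.len moose_order) 1).foldl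
    (fun acc i =>
      hmA_inner moose_order (PySem.List.pyGetD moose_order i 0)
        (PySem.List.pyRange (i - 1) (-1) (-1)) acc)
    [0]

-- ===== PORT B =====
-- inner loop 'for v, j in last.items(): …' of B: running argmax of last index over divisors
def hmB_pick (x : Int) (items : List (Int × Int)) : Int × Int :=
  items.foldl
    (fun b q => if PySem.Int.mod x q.1 = 0 ∧ q.2 > b.1 then (q.2, q.1) else b)
    (-1, 0)

def hated_mooses_alt (moose_order : List Int) : List Int :=
  ((PySem.List.enumerate moose_order).foldl
    (fun (st : List Int × PySem.Dict Int Int) iv =>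
      let res := if iv.1 > 0 then st.1 ++ [(hmB_pick iv.2 st.2.items).2] else st.1
      (res, st.2.insert iv.2 iv.1))
    ([0], PySem.Dict.empty)).1

-- ===== PRECONDITION & SPEC =====
-- Pre_ excludes exactly the inputs on which the Python A raises ZeroDivisionError:
-- a 0 anywhere before the last position is later used as a divisor ('x % 0').
def Pre_hated_mooses (moose_order : List Int) : Prop := (0 : Int) ∉ moose_order.dropLast
instance (moose_order : List Int) : Decidable (Pre_hated_mooses moose_order) := by
  unfold Pre_hated_mooses; infer_instance

def pvWitness_hated_mooses : List Int := [6, 3, 2, 9, 12]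

def Spec_hated_mooses (moose_order : List Int) (out : List Int) : Prop := out = hated_mooses_alt moose_order
instance (moose_order : List Int) (out : List Int) : Decidable (Spec_hated_mooses moose_order out) := by
  unfold Spec_hated_mooses; infer_instance

-- ===== CLAIM (what is proved, stated in full; the proofs are below) =====
def Claim_equal_hated_mooses : Prop := ∀ (moose_order : List Int), Dom_hated_mooses moose_order → Pre_hated_mooses moose_order → Spec_hated_mooses moose_order (hated_mooses moose_order)

-- ===== LEMMAS AND PROOFS =====

-- the shared mathematical description: nearest prior divisor of x in prefix pre (0 if none),
-- and the whole reference output list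
def nearestDiv (pre : List Int) (x : Int) : Int :=
  (pre.reverse.find? (fun y => PySem.Int.mod x y == 0)).getD 0

def refList (a : List Int) : List Int :=
  [0] ++ (List.range a.length).flatMap
    (fun k => if k = 0 then [] else [nearestDiv (a.take k) (a.getD k 0)])

lemma take_succ_getElem (a : List Int) (k : Nat) (h : k < a.length) : a.take (k+1) = a.take k ++ [a[k]] := by
  rw [List.take_add_one]; simp [List.getElem?_eq_getElem h]

lemma pyGetD_nat (a : List Int) (k : Nat) (h : k < a.length) : PySem.List.pyGetD a (k : Int) 0 = a[k] := by
  simp [List.getD_eq_getElem?_getD, List.getElem?_eq_getElem h]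

-- A's inner loop over range(k, -1, -1) appends exactly the nearest prior divisor of the (k+1)-prefix
lemma innerA_eq (a : List Int) (x : Int) (k : Nat) (hk : k < a.length) (acc : List Int) :
    hmA_inner a x (PySem.List.pyRange (k : Int) (-1) (-1)) acc
      = acc ++ [nearestDiv (a.take (k + 1)) x] := by
  induction k generalizing acc with
  | zero =>
    rw [show ((0:Nat):Int) = 0 by norm_num, PySem.List.pyRange_neg_one_cons (by omega),
        PySem.List.pyRange_neg_one_eq_nil (by omega)]
    have h0 : a.take 1 = [a[0]] := by
      have := take_succ_getElem a 0 hk; simpa using this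
    rw [h0]
    unfold nearestDiv
    simp only [List.reverse_singleton, List.find?_singleton]
    unfold hmA_inner
    have hg : PySem.List.pyGetD a 0 0 = a[0] := by simpa using pyGetD_nat a 0 hk
    rw [hg]
    by_cases hm : PySem.Int.mod x a[0] = 0
    · simp [hm]
    · simp [hm, hmA_inner]
  | succ k ih =>
    have hk' : k < a.length := by omega
    rw [show ((k+1:Nat):Int) = (k:Int)+1 by push_cast; ring,
        PySem.List.pyRange_neg_one_cons (by omega)]
    unfold hmA_inner
    rw [show (k:Int) + 1 - 1 = (k:Int) by ring]
    rw [show ((k:Int)+1) = ((k+1:Nat):Int) by push_cast; ring, pyGetD_nat a (k+1) hk]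
    rw [take_succ_getElem a (k+1) hk]
    unfold nearestDiv
    rw [List.reverse_append, List.reverse_singleton, List.singleton_append, List.find?_cons]
    by_cases hm : PySem.Int.mod x a[k+1] = 0
    · simp [hm]
    · have hne : ¬ (((k+1:Nat):Int) = 0) := by omega
      rw [if_neg (by simpa using hm), if_neg hne]
      have := ih hk' acc
      unfold nearestDiv at this
      rw [this, show (PySem.Int.mod x a[k+1] == 0) = false by simp [hm]]

lemma hated_mooses_eq_ref (a : List Int) : hated_mooses a = refList a := by
  unfold hated_mooses refList
  rw [show PySem.List.len a = (a.length : Int) by simp, PySem.List.pyRange_zero_nat,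
      List.foldl_map]
  rw [← PySem.List.foldl_append_eq_flatMap]
  apply PySem.List.foldl_congr_mem'
  intro k hk acc
  rw [List.mem_range] at hk
  match k with
  | 0 =>
    rw [show ((0:Nat):Int) - 1 = -1 by norm_num, PySem.List.pyRange_neg_one_eq_nil (by omega)]
    simp [hmA_inner]
  | m+1 =>
    rw [show ((m+1:Nat):Int) - 1 = (m:Int) by push_cast; ring]
    rw [innerA_eq a _ m (by omega) acc]
    have hg : PySem.List.pyGetD a ((m+1:Nat):Int) 0 = a.getD (m+1) 0 := by
      rw [pyGetD_nat a (m+1) (by omega)]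
      simp [List.getD_eq_getElem?_getD, List.getElem?_eq_getElem hk]
    rw [hg]
    simp

-- B's dict state after a prefix, and what its items are: the graph of 'value ↦ its last index'
def dictOf (pre : List Int) : PySem.Dict Int Int :=
  (PySem.List.enumerate pre).foldl (fun d iv => d.insert iv.2 iv.1) PySem.Dict.empty

def ItemsSpec (pre : List Int) (l : List (Int × Int)) : Prop :=
  (l.map Prod.fst).Nodup ∧
  (∀ q ∈ l, ∃ k : Nat, ∃ _ : k < pre.length,
      q.1 = pre[k] ∧ q.2 = (k : Int) ∧ ∀ m : Nat, k < m → ∀ hm : m < pre.length, pre[m] ≠ q.1) ∧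
  (∀ k : Nat, ∀ h : k < pre.length, ∃ q ∈ l, q.1 = pre[k] ∧ (k : Int) ≤ q.2)

lemma dictOf_append (pre : List Int) (z : Int) :
    dictOf (pre ++ [z]) = (dictOf pre).insert z (pre.length : Int) := by
  unfold dictOf
  rw [PySem.List.enumerate_append, List.foldl_append]
  simp [PySem.List.enumerate_cons, PySem.List.enumerate_nil]

lemma nodup_fst_items (d : PySem.Dict Int Int) (h : d.keys.Nodup) : (d.items.map Prod.fst).Nodup := by
  simpa [PySem.Dict.keys] using h

lemma keys_dictOf_nodup (pre : List Int) : (dictOf pre).keys.Nodup := by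
  induction pre using List.reverseRecOn with
  | nil => simp [dictOf, PySem.List.enumerate_nil, PySem.Dict.empty]
  | append_singleton ys z ih =>
    rw [dictOf_append]
    exact PySem.Dict.nodup_keys_insert _ _ _ ih

lemma itemsSpec_dictOf (pre : List Int) : ItemsSpec pre (dictOf pre).items := by
  induction pre using List.reverseRecOn with
  | nil =>
    refine ⟨?_, ?_, ?_⟩
    · simp [dictOf, PySem.List.enumerate_nil, PySem.Dict.empty]
    · intro q hq; simp [dictOf, PySem.List.enumerate_nil, PySem.Dict.empty] at hq
    · intro k h; simp at h
  | append_singleton ys z ih =>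
    obtain ⟨_, h1, h2⟩ := ih
    rw [dictOf_append]
    refine ⟨nodup_fst_items _ (by rw [← dictOf_append]; exact keys_dictOf_nodup (ys ++ [z])), ?_, ?_⟩
    · intro q hq
      rw [PySem.Dict.mem_items_insert] at hq
      rcases hq with rfl | ⟨hq, hne⟩
      · refine ⟨ys.length, by simp, ?_, ?_, ?_⟩
        · simp
        · simp
        · intro m hm hm2 _
          simp at hm2; omega
      · obtain ⟨k, hk, hv, hj, hlast⟩ := h1 q hq
        refine ⟨k, by simp; omega, ?_, hj, ?_⟩
        · rw [hv, List.getElem_append_left hk]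
        · intro m hm hm2
          by_cases hmy : m < ys.length
          · rw [List.getElem_append_left hmy]; exact hlast m hm hmy
          · have hmlen : m < ys.length + 1 := by simpa using hm2
            have : m = ys.length := by omega
            subst this
            rw [List.getElem_concat_length rfl hm2]
            exact fun h => hne h.symm
    · intro k hk
      by_cases hky : k < ys.length
      · obtain ⟨q, hq, hv, hle⟩ := h2 k hky
        by_cases hqz : q.1 = z
        · refine ⟨(z, (ys.length : Int)), PySem.Dict.mem_items_insert_self _ _ _, ?_, ?_⟩
          · rw [List.getElem_append_left hky, ← hv, hqz]
          · have : (k:Int) < (ys.length:Int) := by exact_mod_cast hky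
            omega
        · refine ⟨q, ?_, ?_, hle⟩
          · rw [PySem.Dict.mem_items_insert]; exact Or.inr ⟨hq, hqz⟩
          · rw [List.getElem_append_left hky]; exact hv
      · have : k = ys.length := by simp at hk; omega
        subst this
        exact ⟨(z, (ys.length : Int)), PySem.Dict.mem_items_insert_self _ _ _,
          by simp, le_refl _⟩

-- the argmax fold: items with a divisor key never improve past the bound / stay put once maximal
lemma pickF1 (x : Int) (l : List (Int × Int)) (b : Int × Int)
    (h : ∀ q ∈ l, PySem.Int.mod x q.1 = 0 → q.2 ≤ b.1) :
    l.foldl (fun b q => if PySem.Int.mod x q.1 = 0 ∧ q.2 > b.1 then (q.2, q.1) else b) b = b := by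
  induction l with
  | nil => rfl
  | cons q t ih =>
    simp only [List.foldl_cons]
    rw [if_neg (by
      rintro ⟨hm, hgt⟩
      exact absurd (h q (List.mem_cons_self) hm) (by omega))]
    exact ih (fun q hq hm => h q (List.mem_cons_of_mem _ hq) hm)

lemma pickF2 (x : Int) (l : List (Int × Int)) (J : Int) :
    ∀ b : Int × Int, (∀ q ∈ l, PySem.Int.mod x q.1 = 0 → q.2 ≤ J) → b.1 ≤ J →
    (l.foldl (fun b q => if PySem.Int.mod x q.1 = 0 ∧ q.2 > b.1 then (q.2, q.1) else b) b).1 ≤ J := by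
  induction l with
  | nil => intro b _ hb; exact hb
  | cons q t ih =>
    intro b h hb
    simp only [List.foldl_cons]
    by_cases hc : PySem.Int.mod x q.1 = 0 ∧ q.2 > b.1
    · rw [if_pos hc]
      exact ih _ (fun q hq hm => h q (List.mem_cons_of_mem _ hq) hm)
        (h q List.mem_cons_self hc.1)
    · rw [if_neg hc]
      exact ih _ (fun q hq hm => h q (List.mem_cons_of_mem _ hq) hm) hb

lemma pick_eq_nearest (x : Int) (pre : List Int) (l : List (Int × Int))
    (hspec : ItemsSpec pre l) : (hmB_pick x l).2 = nearestDiv pre x := by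
  obtain ⟨hnd, h1, h2⟩ := hspec
  unfold hmB_pick nearestDiv
  cases hfind : pre.reverse.find? (fun y => PySem.Int.mod x y == 0) with
  | none =>
    have hnone : ∀ y ∈ pre, ¬ (PySem.Int.mod x y = 0) := by
      intro y hy
      have := List.find?_eq_none.mp hfind y (List.mem_reverse.mpr hy)
      simpa using this
    rw [pickF1 x l (-1, 0) (fun q hq hm => by
      obtain ⟨k, hk, hv, -, -⟩ := h1 q hq
      exact absurd hm (hv ▸ hnone pre[k] (List.getElem_mem hk)))]
    rfl
  | some y =>
    obtain ⟨hpy, as, bs, hrev, has⟩ := List.find?_eq_some_iff_append.mp hfind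
    have hpy' : PySem.Int.mod x y = 0 := by simpa using hpy
    have hpre : pre = bs.reverse ++ y :: as.reverse := by
      have := congrArg List.reverse hrev
      simpa using this
    -- facts about indices in pre
    subst hpre
    have hlen : bs.length < (bs.reverse ++ y :: as.reverse).length := by simp
    have hyj : (bs.reverse ++ y :: as.reverse)[bs.length]'hlen = y := by
      rw [List.getElem_append_right (by simp)]
      simp
    have hR : ∀ m : Nat, bs.length < m → ∀ hm : m < (bs.reverse ++ y :: as.reverse).length,
        ¬ (PySem.Int.mod x ((bs.reverse ++ y :: as.reverse)[m]'hm) = 0) := by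
      intro m hgt hm
      have hmem : (bs.reverse ++ y :: as.reverse)[m]'hm ∈ as.reverse := by
        have hsplit : bs.reverse ++ y :: as.reverse = (bs.reverse ++ [y]) ++ as.reverse := by simp
        have hm2 : m < ((bs.reverse ++ [y]) ++ as.reverse).length := by simp at hm ⊢; omega
        rw [List.getElem_of_eq hsplit, List.getElem_append_right (by simp; omega)]
        exact List.getElem_mem _
      have := has _ (List.mem_reverse.mp hmem)
      simpa using this
    -- the item (y, bs.length) is in l
    obtain ⟨q0, hq0, hq0v, hq0le⟩ := h2 bs.length hlen
    obtain ⟨k0, hk0, hv0, hj0, -⟩ := h1 q0 hq0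
    have hk0e : k0 = bs.length := by
      by_contra hne
      have hgt : bs.length < k0 := by
        have : (bs.length : Int) ≤ (k0 : Int) := hj0 ▸ hq0le
        omega
      have hval : (bs.reverse ++ y :: as.reverse)[k0]'hk0 = y := by
        rw [← hv0, hq0v]; exact hyj
      exact hR k0 hgt hk0 (by rw [hval]; exact hpy')
    have hq0eq : q0 = (y, (bs.length : Int)) := by
      have := hq0v
      rw [hyj] at this
      exact Prod.ext this (by rw [hj0, hk0e])
    subst hq0eq
    -- split l at that item
    obtain ⟨l1, l2, rfl⟩ := List.append_of_mem hq0
    have hnd' := hnd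
    rw [List.map_append, List.map_cons] at hnd'
    have hy_not1 : ∀ q ∈ l1, q.1 ≠ y := by
      intro q hq hqy
      have h3 := (List.nodup_append.mp hnd').2.2
      exact h3 q.1 (List.mem_map.mpr ⟨q, hq, rfl⟩) y (by exact List.mem_cons_self) hqy
    have hy_not2 : ∀ q ∈ l2, q.1 ≠ y := by
      have hcons := (List.nodup_append.mp hnd').2.1
      have hnotin := (List.nodup_cons.mp hcons).1
      intro q hq hqy
      exact hnotin (List.mem_map.mpr ⟨q, hq, hqy⟩)
    -- bound for all divisor items
    have hbound : ∀ q ∈ l1 ++ ((y, (bs.length:Int)) :: l2), PySem.Int.mod x q.1 = 0 → q.2 ≤ (bs.length : Int) := by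
      intro q hq hm
      obtain ⟨k, hk, hv, hj, -⟩ := h1 q hq
      have : k ≤ bs.length := by
        by_contra hgt
        exact hR k (by omega) hk (hv ▸ hm)
      omega
    rw [List.foldl_append]
    have hb1 : (l1.foldl (fun b q => if PySem.Int.mod x q.1 = 0 ∧ q.2 > b.1 then (q.2, q.1) else b) (-1, 0)).1 ≤ (bs.length : Int) - 1 := by
      apply pickF2
      · intro q hq hm
        have hle := hbound q (List.mem_append_left _ hq) hm
        have hne := hy_not1 q hq
        obtain ⟨k, hk, hv, hj, -⟩ := h1 q (List.mem_append_left _ hq)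
        have : k ≠ bs.length := by
          intro he
          subst he
          exact hne (by rw [hv]; exact hyj)
        omega
      · show (-1 : Int) ≤ (bs.length : Int) - 1
        omega
    simp only [List.foldl_cons]
    rw [if_pos ⟨hpy', by omega⟩]
    rw [pickF1 x l2 _ (fun q hq hm => by
      have hle := hbound q (List.mem_append_right _ (List.mem_cons_of_mem _ hq)) hm
      simpa using hle)]
    rfl

lemma refList_append (ys : List Int) (z : Int) :
    refList (ys ++ [z]) = refList ys ++ (if ys.length = 0 then [] else [nearestDiv ys z]) := by
  unfold refList
  have hn : (ys ++ [z]).length = ys.length + 1 := by simp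
  rw [hn, List.range_succ, List.flatMap_append]
  have h1 : (List.range ys.length).flatMap
      (fun k => if k = 0 then [] else [nearestDiv ((ys ++ [z]).take k) ((ys ++ [z]).getD k 0)])
      = (List.range ys.length).flatMap
      (fun k => if k = 0 then [] else [nearestDiv (ys.take k) (ys.getD k 0)]) := by
    rw [List.flatMap_def, List.flatMap_def]
    congr 1
    apply List.map_congr_left
    intro k hk
    rw [List.mem_range] at hk
    by_cases h0 : k = 0
    · simp [h0]
    · have ht : (ys ++ [z]).take k = ys.take k := List.take_append_of_le_length (by omega)
      have hg : (ys ++ [z]).getD k 0 = ys.getD k 0 := by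
        rw [List.getD_eq_getElem?_getD, List.getD_eq_getElem?_getD,
            List.getElem?_append_left (by omega)]
      rw [if_neg h0, if_neg h0, ht, hg]
  have h2 : List.flatMap
      (fun k => if k = 0 then [] else [nearestDiv ((ys ++ [z]).take k) ((ys ++ [z]).getD k 0)])
      [ys.length] = if ys.length = 0 then [] else [nearestDiv ys z] := by
    simp only [List.flatMap_cons, List.flatMap_nil, List.append_nil]
    by_cases h0 : ys.length = 0
    · simp [h0]
    · have ht : (ys ++ [z]).take ys.length = ys := List.take_left
      have hg : (ys ++ [z]).getD ys.length 0 = z := by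
        rw [List.getD_eq_getElem?_getD, List.getElem?_append_right (by omega)]
        simp
      rw [if_neg h0, if_neg h0, ht, hg]
  rw [h1, h2, List.append_assoc]

lemma altState (a : List Int) :
    (PySem.List.enumerate a).foldl
      (fun (st : List Int × PySem.Dict Int Int) iv =>
        let res := if iv.1 > 0 then st.1 ++ [(hmB_pick iv.2 st.2.items).2] else st.1
        (res, st.2.insert iv.2 iv.1))
      ([0], PySem.Dict.empty) = (refList a, dictOf a) := by
  induction a using List.reverseRecOn with
  | nil => simp [refList, dictOf, PySem.List.enumerate_nil]
  | append_singleton ys z ih =>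
    rw [PySem.List.enumerate_append, List.foldl_append, ih]
    simp only [PySem.List.enumerate_cons, PySem.List.enumerate_nil, List.foldl_cons, List.foldl_nil]
    rw [dictOf_append, refList_append]
    by_cases h0 : ys.length = 0
    · have : ys = [] := List.length_eq_zero_iff.mp h0
      subst this
      simp [refList]
    · have hgt : ((0:Int) + (ys.length:Int)) > 0 := by
        have : 0 < ys.length := Nat.pos_of_ne_zero h0
        omega
      rw [if_pos hgt, if_neg h0]
      have hpick := pick_eq_nearest z ys (dictOf ys).items (itemsSpec_dictOf ys)
      rw [hpick]
      congr 2
      omega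

lemma alt_eq_ref (a : List Int) : hated_mooses_alt a = refList a := by
  unfold hated_mooses_alt
  rw [altState]

-- ===== VERDICT (by name: the statement is the Claim_ definition above) =====
theorem hated_mooses_spec : Claim_equal_hated_mooses := by
  intro moose_order _ _
  unfold Spec_hated_mooses
  rw [hated_mooses_eq_ref, alt_eq_ref]
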